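-- pv_equiv track=rewrite | github.com/liuyubiao/test_2 | category/category_133.py | sort_keyWord
-- ===== SOURCE A (Python) =====
-- def sort_keyWord(unsort_list,key_words):
--     tmp_dict = {}
--     for info in unsort_list:
--         if info not in tmp_dict.keys():
--             tmp_dict[info] = 0
--         else:
--             continue
--         for kw in key_words:
--             if kw in info:
--                 tmp_dict[info] += 1
--
--     sorted_list = sorted(unsort_list,key=lambda x: tmp_dict[x],reverse=True)
--     return sorted_list
-- ===== SOURCE B (Python) =====
-- def sort_keyWord(unsort_list, key_words):
--     # Bucket (counting) sort: a string containing c of the keywords goes into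
--     # bucket c; buckets emitted from highest count to lowest reproduce the
--     # stable descending order without any comparison sort.
--     buckets = [[] for _ in range(len(key_words) + 1)]
--     for info in unsort_list:
--         c = 0
--         for kw in key_words:
--             if kw in info:
--                 c += 1
--         buckets[c].append(info)
--     out = []
--     for b in reversed(buckets):
--         out.extend(b)
--     return out
-- ===== Notes on version B (the rewrite author's own statement) =====
-- stated objective: alternative
-- what changed: Replaced A's 'dedup count table + comparison sort with dict lookups' by a bucket (counting) sort: each string is appended to bucket[count of matching keywords] in one pass and the buckets are concatenated from highest to lowest, which yields the stable descending order without calling sorted at all.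
import Mathlib
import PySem

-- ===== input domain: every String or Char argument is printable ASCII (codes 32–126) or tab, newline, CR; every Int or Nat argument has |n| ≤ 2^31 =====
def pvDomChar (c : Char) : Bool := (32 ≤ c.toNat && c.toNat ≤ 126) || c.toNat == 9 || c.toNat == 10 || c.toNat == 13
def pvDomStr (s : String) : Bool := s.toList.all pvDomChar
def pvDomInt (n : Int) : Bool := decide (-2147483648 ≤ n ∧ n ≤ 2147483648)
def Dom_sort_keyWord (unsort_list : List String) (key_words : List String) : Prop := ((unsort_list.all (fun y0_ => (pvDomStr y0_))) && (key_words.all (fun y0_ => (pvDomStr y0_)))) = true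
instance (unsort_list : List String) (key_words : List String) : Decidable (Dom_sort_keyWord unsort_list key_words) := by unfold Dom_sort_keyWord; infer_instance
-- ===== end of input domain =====

-- B replaces A's 'dedup count table + comparison sort' by a bucket (counting) sort over
-- the keyword counts, concatenating the buckets from highest to lowest (objective: alternative).

-- ===== PORT A =====
def sort_keyWord (unsort_list : List String) (key_words : List String) : List String :=
  let tmp_dict : PySem.Dict String Int :=
    unsort_list.foldl (fun d info =>
      if d.contains info then d        -- 'info not in tmp_dict.keys()' (the else: continue)
      else
        key_words.foldl (fun d kw =>
          if PySem.Str.isIn kw info then d.modify info 0 (· + 1) else d)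
          (d.insert info 0))
      PySem.Dict.empty
  -- Python's tmp_dict[x] never raises here (every x ∈ unsort_list is a key), so getD is exact
  PySem.List.sorted unsort_list (fun x => tmp_dict.getD x 0) true

-- ===== PORT B =====
def sort_keyWord_alt (unsort_list : List String) (key_words : List String) : List String :=
  let buckets0 : List (List String) := List.replicate (key_words.length + 1) []
  let buckets : List (List String) :=
    unsort_list.foldl (fun bs info =>
      let c : Nat := key_words.foldl (fun c kw => if PySem.Str.isIn kw info then c + 1 else c) 0
      bs.modify c (fun b => b ++ [info])) buckets0
  buckets.reverse.foldl (fun out b => out ++ b) []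

-- ===== PRECONDITION & SPEC =====
def Spec_sort_keyWord (unsort_list : List String) (key_words : List String) (out : List String) : Prop := out = sort_keyWord_alt unsort_list key_words
instance (unsort_list : List String) (key_words : List String) (out : List String) : Decidable (Spec_sort_keyWord unsort_list key_words out) := by unfold Spec_sort_keyWord; infer_instance

-- ===== CLAIM (what is proved, stated in full; the proofs are below) =====
def Claim_equal_sort_keyWord : Prop := ∀ (unsort_list : List String) (key_words : List String), Dom_sort_keyWord unsort_list key_words → Spec_sort_keyWord unsort_list key_words (sort_keyWord unsort_list key_words)

-- ===== LEMMAS AND PROOFS =====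

-- number of keywords occurring in x, as Nat and as Int (A's dict values)
def pvCntN (key_words : List String) (x : String) : Nat :=
  key_words.countP (fun kw => PySem.Str.isIn kw x)

def pvCnt (key_words : List String) (x : String) : Int :=
  (pvCntN key_words x : Int)

-- ---------- A-side: the dict built by A maps every listed string to its count ----------

-- one outer-loop step of A's table construction
def pvStep (key_words : List String) (d : PySem.Dict String Int) (info : String) :
    PySem.Dict String Int :=
  if d.contains info then d
  else
    key_words.foldl (fun d kw =>
      if PySem.Str.isIn kw info then d.modify info 0 (· + 1) else d)
      (d.insert info 0)

theorem pvStep_getD (key_words : List String) (d : PySem.Dict String Int) (info y : String)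
    (h : d.contains info = false) :
    (pvStep key_words d info).getD y 0 =
      if y = info then pvCnt key_words info else d.getD y 0 := by
  unfold pvStep
  rw [if_neg (by simp [h])]
  rw [PySem.List.foldl_if_eq_foldl_filter (fun kw => PySem.Str.isIn kw info)
      (fun d _ => d.modify info 0 (· + 1)) key_words (d.insert info 0)]
  rw [show (List.foldl (fun (d : PySem.Dict String Int) (_ : String) => d.modify info 0 (· + 1))
        (d.insert info 0) (List.filter (fun kw => PySem.Str.isIn kw info) key_words))
      = (List.foldl (fun (d : PySem.Dict String Int) (x : String) => d.modify x 0 (· + 1))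
          (d.insert info 0)
          ((List.filter (fun kw => PySem.Str.isIn kw info) key_words).map
            (Function.const String info))) from
    (List.foldl_map (f := Function.const String info)
      (g := fun (d : PySem.Dict String Int) (x : String) => d.modify x 0 (· + 1))
      (l := List.filter (fun kw => PySem.Str.isIn kw info) key_words)
      (init := d.insert info 0)).symm]
  rw [PySem.Dict.getD_foldl_modify_add_one, List.map_const, List.count_replicate,
      PySem.Dict.getD_insert]
  have hcnt : pvCnt key_words info
      = ((List.filter (fun kw => PySem.Str.isIn kw info) key_words).length : Int) := by
    unfold pvCnt pvCntN
    rw [List.countP_eq_length_filter]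
  by_cases hy : y = info
  · simp [hy, hcnt]
  · simp [hy, Ne.symm hy]

theorem pvStep_contains (key_words : List String) (d : PySem.Dict String Int) (info y : String) :
    (pvStep key_words d info).contains y = (y == info || d.contains y) := by
  unfold pvStep
  by_cases hc : d.contains info
  · rw [if_pos hc]
    by_cases hy : y = info
    · subst hy; simp [hc]
    · simp [hy]
  · rw [if_neg hc]
    have key : ∀ (l : List String) (e : PySem.Dict String Int),
        e.contains info = true →
        (l.foldl (fun e kw =>
            if PySem.Str.isIn kw info then e.modify info 0 (· + 1) else e) e).contains y
          = e.contains y := by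
      intro l
      induction l with
      | nil => intro e _; rfl
      | cons a l ih =>
        intro e he
        simp only [List.foldl_cons]
        by_cases ha : PySem.Str.isIn a info
        · rw [if_pos ha, ih _ (by simp [PySem.Dict.contains_modify])]
          rw [PySem.Dict.contains_modify]
          by_cases hy : y = info
          · subst hy; simp [he]
          · simp [hy]
        · rw [if_neg ha, ih _ he]
    rw [key key_words (d.insert info 0) (by simp),
        PySem.Dict.contains_insert]

-- invariant: every key already in the table carries its correct count
def pvInv (key_words : List String) (d : PySem.Dict String Int) : Prop :=
  ∀ z, d.contains z = true → d.getD z 0 = pvCnt key_words z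

theorem pvStep_inv (key_words : List String) (d : PySem.Dict String Int) (info : String)
    (h : pvInv key_words d) : pvInv key_words (pvStep key_words d info) := by
  by_cases hc : d.contains info
  · unfold pvStep; rw [if_pos hc]; exact h
  · intro z hz
    rw [pvStep_getD key_words d info z (by simpa using hc)]
    by_cases hzinfo : z = info
    · simp [hzinfo]
    · rw [if_neg hzinfo]
      apply h
      rw [pvStep_contains] at hz
      simpa [hzinfo] using hz

theorem pvFold_contains_mono (key_words : List String) (l : List String)
    (d : PySem.Dict String Int) (y : String) (h : d.contains y = true) :
    (l.foldl (pvStep key_words) d).contains y = true := by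
  induction l generalizing d with
  | nil => exact h
  | cons a l ih =>
    simp only [List.foldl_cons]
    exact ih _ (by rw [pvStep_contains]; simp [h])

theorem pvBuild_spec (key_words : List String) (l : List String) (d : PySem.Dict String Int)
    (h : pvInv key_words d) :
    pvInv key_words (l.foldl (pvStep key_words) d) ∧
      ∀ y ∈ l, (l.foldl (pvStep key_words) d).contains y = true := by
  induction l generalizing d with
  | nil => exact ⟨h, by simp⟩
  | cons a l ih =>
    obtain ⟨h1, h2⟩ := ih (pvStep key_words d a) (pvStep_inv key_words d a h)
    refine ⟨h1, ?_⟩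
    intro y hy
    rcases List.mem_cons.mp hy with hya | hyl
    · subst hya
      exact pvFold_contains_mono key_words l _ y (by rw [pvStep_contains]; simp)
    · exact h2 y hyl

theorem pvInsertBy_congr {α : Type} (b1 b2 : α → α → Bool) (x : α) (ys : List α)
    (h : ∀ y ∈ ys, b1 x y = b2 x y) :
    PySem.List.insertBy b1 x ys = PySem.List.insertBy b2 x ys := by
  induction ys with
  | nil => rfl
  | cons y ys ih =>
    simp only [PySem.List.insertBy]
    rw [h y (by simp)]
    by_cases hb : b2 x y
    · simp [hb]
    · simp only [hb, Bool.false_eq_true, if_false]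
      have := ih (fun z hz => h z (by simp [hz]))
      rw [this]

-- sorted (reverse=True) only looks at the keys of list members
theorem pvSorted_rev_key_congr {α : Type} (xs : List α) (k1 k2 : α → Int)
    (h : ∀ x ∈ xs, k1 x = k2 x) :
    PySem.List.sorted xs k1 true = PySem.List.sorted xs k2 true := by
  rw [PySem.List.sorted_rev_eq_foldl_insertBy, PySem.List.sorted_rev_eq_foldl_insertBy]
  have main : ∀ (l : List α) (acc : List α),
      (∀ x ∈ l, k1 x = k2 x) → (∀ y ∈ acc, k1 y = k2 y) →
      List.foldl (fun acc x => PySem.List.insertBy (fun a b => decide (k1 b < k1 a)) x acc) acc l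
        = List.foldl (fun acc x => PySem.List.insertBy (fun a b => decide (k2 b < k2 a)) x acc) acc l := by
    intro l
    induction l with
    | nil => intro acc _ _; rfl
    | cons x l ih =>
      intro acc hl hacc
      simp only [List.foldl_cons]
      have hx : k1 x = k2 x := hl x (by simp)
      have hins : PySem.List.insertBy (fun a b => decide (k1 b < k1 a)) x acc
          = PySem.List.insertBy (fun a b => decide (k2 b < k2 a)) x acc :=
        pvInsertBy_congr _ _ x acc (fun y hy => by rw [hx, hacc y hy])
      rw [hins]
      exact ih _ (fun z hz => hl z (by simp [hz]))
        (fun y hy => by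
          rcases (PySem.List.mem_insertBy _ _ _ _).mp hy with h' | h'
          · rw [h', hx]
          · exact hacc y h')
  exact main xs [] h (by simp)

-- ---------- generic: a stable descending sort is a bucket concatenation ----------

-- concatenation of the key-c buckets of xs, over the key values listed in cs
def pvCat {α : Type} (key : α → Int) (xs : List α) (cs : List Int) : List α :=
  cs.flatMap (fun c => xs.filter (fun x => key x == c))

theorem pvInsertBy_skip {α : Type} (p : α → α → Bool) (x : α) (l1 l2 : List α)
    (h : ∀ y ∈ l1, p x y = false) :
    PySem.List.insertBy p x (l1 ++ l2) = l1 ++ PySem.List.insertBy p x l2 := by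
  induction l1 with
  | nil => simp
  | cons y l1 ih =>
    simp only [List.cons_append, PySem.List.insertBy, h y (by simp)]
    simp [ih (fun z hz => h z (by simp [hz]))]

theorem pvInsertBy_front {α : Type} (p : α → α → Bool) (x : α) (l : List α)
    (h : ∀ y ∈ l, p x y = true) :
    PySem.List.insertBy p x l = x :: l := by
  cases l with
  | nil => rfl
  | cons y l => simp [PySem.List.insertBy, h y (by simp)]

theorem pvCat_irrelevant {α : Type} (key : α → Int) (xs : List α) (x : α) (cs : List Int)
    (h : ∀ c ∈ cs, key x ≠ c) :
    pvCat key (xs ++ [x]) cs = pvCat key xs cs := by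
  induction cs with
  | nil => rfl
  | cons c cs ih =>
    simp only [pvCat, List.flatMap_cons] at *
    rw [List.filter_append, ih (fun c' hc' => h c' (by simp [hc']))]
    have hne : (key x == c) = false := beq_eq_false_iff_ne.mpr (h c (by simp))
    simp [List.filter, hne]

theorem pvInsert_cat {α : Type} (key : α → Int) (xs : List α) (x : α) (cs : List Int)
    (hp : cs.Pairwise (· > ·)) (hm : key x ∈ cs) :
    PySem.List.insertBy (fun a b => decide (key b < key a)) x (pvCat key xs cs)
      = pvCat key (xs ++ [x]) cs := by
  induction cs with
  | nil => simp at hm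
  | cons c cs ih =>
    have htail : ∀ c' ∈ cs, c' < c := by
      intro c' hc'
      exact (List.pairwise_cons.mp hp).1 c' hc'
    simp only [pvCat, List.flatMap_cons]
    by_cases hx : key x = c
    · -- x belongs to the head bucket: it is appended at its end
      rw [pvInsertBy_skip _ x _ _ (by
        intro y hy
        have : key y = c := by simpa using (List.mem_filter.mp hy).2
        simp [this, hx])]
      rw [pvInsertBy_front _ x _ (by
        intro y hy
        obtain ⟨c', hc', hyf⟩ := List.mem_flatMap.mp hy
        have h1 : key y = c' := by simpa using (List.mem_filter.mp hyf).2
        have h2 : c' < c := htail c' hc'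
        simp [h1, hx]; omega)]
      have hhead : List.filter (fun y => key y == c) (xs ++ [x])
          = List.filter (fun y => key y == c) xs ++ [x] := by
        rw [List.filter_append]
        simp [List.filter, hx]
      have hrest : pvCat key (xs ++ [x]) cs = pvCat key xs cs :=
        pvCat_irrelevant key xs x cs (by
          intro c' hc'
          have := htail c' hc'
          omega)
      simp only [pvCat] at hrest
      rw [hhead, hrest]
      simp
    · -- x belongs to a later bucket
      have hm' : key x ∈ cs := by
        rcases List.mem_cons.mp hm with h | h
        · exact absurd h hx
        · exact h
      have hxlt : key x < c := htail _ hm'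
      rw [pvInsertBy_skip _ x _ _ (by
        intro y hy
        have : key y = c := by simpa using (List.mem_filter.mp hy).2
        simp [this]; omega)]
      have hhead : List.filter (fun y => key y == c) (xs ++ [x])
          = List.filter (fun y => key y == c) xs := by
        rw [List.filter_append]
        have hne : (key x == c) = false := beq_eq_false_iff_ne.mpr hx
        simp [List.filter, hne]
      have := ih (List.pairwise_cons.mp hp).2 hm'
      simp only [pvCat] at this
      rw [this, hhead]

theorem pvSorted_eq_cat {α : Type} (key : α → Int) (xs : List α) (cs : List Int)
    (hp : cs.Pairwise (· > ·)) (hm : ∀ x ∈ xs, key x ∈ cs) :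
    PySem.List.sorted xs key true = pvCat key xs cs := by
  rw [PySem.List.sorted_rev_eq_foldl_insertBy]
  induction xs using List.reverseRecOn with
  | nil => simp [pvCat]
  | append_singleton l x ih =>
    rw [List.foldl_append, List.foldl_cons, List.foldl_nil]
    rw [ih (fun y hy => hm y (by simp [hy]))]
    exact pvInsert_cat key l x cs hp (hm x (by simp))

-- ---------- B-side: the bucket fold computes the per-count filters ----------

theorem pvCntLoop (key_words : List String) (info : String) :
    key_words.foldl (fun c kw => if PySem.Str.isIn kw info then c + 1 else c) 0
      = pvCntN key_words info := by
  unfold pvCntN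
  have : ∀ (l : List String) (a : Nat),
      l.foldl (fun c kw => if PySem.Str.isIn kw info then c + 1 else c) a
        = a + l.countP (fun kw => PySem.Str.isIn kw info) := by
    intro l
    induction l with
    | nil => simp
    | cons k l ih =>
      intro a
      simp only [List.foldl_cons, List.countP_cons]
      by_cases hk : PySem.Str.isIn k info = true
      · rw [if_pos hk, if_pos hk, ih]; omega
      · rw [if_neg hk, if_neg hk, ih]; omega
  simpa using this key_words 0

theorem pvBuckets_spec (key_words : List String) (l : List String) :
    l.foldl (fun bs info =>
        bs.modify (key_words.foldl (fun c kw => if PySem.Str.isIn kw info then c + 1 else c) 0)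
          (fun b => b ++ [info]))
      (List.replicate (key_words.length + 1) [])
      = (List.range (key_words.length + 1)).map
          (fun i => l.filter (fun x => pvCntN key_words x == i)) := by
  induction l using List.reverseRecOn with
  | nil =>
    apply List.ext_getElem (by simp)
    intro i h1 h2
    simp
  | append_singleton l x ih =>
    rw [List.foldl_append, List.foldl_cons, List.foldl_nil, ih, pvCntLoop]
    have hlt : pvCntN key_words x < key_words.length + 1 := by
      unfold pvCntN
      exact Nat.lt_succ_of_le List.countP_le_length
    apply List.ext_getElem (by simp)
    intro i h1 h2
    rw [List.getElem_modify]
    simp only [List.length_modify, List.length_map, List.length_range] at h1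
    simp only [List.getElem_map, List.getElem_range, List.filter_append]
    by_cases hi : pvCntN key_words x = i
    · have hb : (pvCntN key_words x == i) = true := by simp [hi]
      rw [if_pos hi]
      simp [List.filter, hb]
    · have hb : (pvCntN key_words x == i) = false := by simp [hi]
      rw [if_neg hi]
      simp [List.filter, hb]

-- ===== VERDICT (by name: the statement is the Claim_ definition above) =====
theorem sort_keyWord_spec : Claim_equal_sort_keyWord := by
  intro u k _
  unfold Spec_sort_keyWord
  -- A's dict carries the keyword count of every member of u
  have hb := pvBuild_spec k u PySem.Dict.empty
    (fun z hz => by simp [PySem.Dict.contains_empty] at hz)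
  have hA : sort_keyWord u k = PySem.List.sorted u (pvCnt k) true :=
    pvSorted_rev_key_congr u _ _ (fun x hx => hb.1 x (hb.2 x hx))
  -- the descending key values, highest first
  have hcs : (((List.range (k.length + 1)).map (fun i : Nat => (i : Int))).reverse).Pairwise
      (· > ·) := by
    rw [List.pairwise_reverse, List.pairwise_map]
    exact (List.pairwise_lt_range).imp (fun h => by exact_mod_cast h)
  have hmem : ∀ x ∈ u, pvCnt k x
      ∈ ((List.range (k.length + 1)).map (fun i : Nat => (i : Int))).reverse := by
    intro x _
    rw [List.mem_reverse, List.mem_map]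
    refine ⟨pvCntN k x, ?_, rfl⟩
    rw [List.mem_range]
    unfold pvCntN
    exact Nat.lt_succ_of_le List.countP_le_length
  -- B reaches the bucket concatenation
  have hB : sort_keyWord_alt u k
      = ((List.range (k.length + 1)).map
          (fun i => u.filter (fun x => pvCntN k x == i))).reverse.flatten := by
    unfold sort_keyWord_alt
    simp only [pvBuckets_spec k u, PySem.List.foldl_append_eq_flatten, List.nil_append]
  have hfun : ((fun c : Int => u.filter (fun x => pvCnt k x == c)) ∘ (fun i : Nat => (i : Int)))
      = fun i : Nat => u.filter (fun x => pvCntN k x == i) := by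
    funext i
    apply List.filter_congr
    intro x _
    unfold pvCnt
    simp
  rw [hA, pvSorted_eq_cat (pvCnt k) u
      (((List.range (k.length + 1)).map (fun i : Nat => (i : Int))).reverse) hcs hmem, hB]
  unfold pvCat
  rw [List.flatMap_def, ← List.map_reverse, ← List.map_reverse, List.map_map, hfun]
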